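-- pv_equiv track=rewrite | github.com/rohitpmore/agentic-ai | assignments/assignment-6/src/agents/research/financial_researcher.py | _assess_sector_impact
-- ===== SOURCE A (Python) =====
-- from typing import Dict, Any, List
--
-- def _assess_sector_impact(research_topic: str, implications: List[str]) -> Dict[str, str]:
--     """Assess impact on different sectors"""
--
--     sectors = ["technology", "healthcare", "finance", "energy", "consumer", "industrial"]
--     sector_impact = {}
--
--     topic_lower = research_topic.lower()
--
--     for sector in sectors:
--         if sector in topic_lower:
--             sector_impact[sector] = "high"
--         elif any(sector in impl.lower() for impl in implications):
--             sector_impact[sector] = "medium"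
--         else:
--             sector_impact[sector] = "low"
--
--     return sector_impact
-- ===== SOURCE B (Python) =====
-- from typing import Dict, List
--
-- def _assess_sector_impact(research_topic: str, implications: List[str]) -> Dict[str, str]:
--     """Assess impact on different sectors (index-then-classify)."""
--     sectors = ["technology", "healthcare", "finance", "energy", "consumer", "industrial"]
--     topic_lower = research_topic.lower()
--     medium = set()
--     for impl in implications:
--         il = impl.lower()
--         medium.update(s for s in sectors if s in il)
--     return {s: "high" if s in topic_lower else ("medium" if s in medium else "low")
--             for s in sectors}
-- ===== Notes on version B (the rewrite author's own statement) =====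
-- stated objective: simpler
-- what changed: B makes one pass over implications (lowercasing each exactly once) to build a set of sectors mentioned there, then classifies each sector by two membership tests, instead of A's per-sector rescan of all implications.
import Mathlib
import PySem

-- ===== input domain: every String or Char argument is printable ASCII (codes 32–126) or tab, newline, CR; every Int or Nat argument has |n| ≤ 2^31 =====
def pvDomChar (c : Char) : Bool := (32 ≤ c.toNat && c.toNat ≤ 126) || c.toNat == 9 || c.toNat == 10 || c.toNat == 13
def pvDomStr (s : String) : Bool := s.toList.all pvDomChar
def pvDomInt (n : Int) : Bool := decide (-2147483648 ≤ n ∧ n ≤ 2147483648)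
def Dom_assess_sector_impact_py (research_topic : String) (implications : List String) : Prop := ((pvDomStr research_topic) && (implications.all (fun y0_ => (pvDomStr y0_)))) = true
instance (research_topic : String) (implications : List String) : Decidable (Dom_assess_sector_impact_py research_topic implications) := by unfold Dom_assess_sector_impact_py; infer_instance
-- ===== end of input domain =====

-- B builds the set of sectors mentioned in the implications in one pass (lowercasing each
-- implication once), then classifies each sector by membership tests; simpler than A's
-- per-sector rescan of all implications.


-- ===== PORT A =====
def assess_sector_impact_py (research_topic : String) (implications : List String) : List (String × String) :=
  let sectors : List String := ["technology", "healthcare", "finance", "energy", "consumer", "industrial"]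
  let topic_lower := PySem.Str.lower research_topic
  let sector_impact := sectors.foldl (fun sector_impact sector =>
    if PySem.Str.isIn sector topic_lower then
      PySem.Dict.insert sector_impact sector "high"
    else if implications.any (fun impl => PySem.Str.isIn sector (PySem.Str.lower impl)) then
      PySem.Dict.insert sector_impact sector "medium"
    else
      PySem.Dict.insert sector_impact sector "low") PySem.Dict.empty
  sector_impact.items

-- ===== PORT B =====
def assess_sector_impact_py_alt (research_topic : String) (implications : List String) : List (String × String) :=
  let sectors : List String := ["technology", "healthcare", "finance", "energy", "consumer", "industrial"]
  let topic_lower := PySem.Str.lower research_topic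
  let medium : PySem.Set String := implications.foldl (fun acc impl =>
    let il := PySem.Str.lower impl
    PySem.Set.update acc (sectors.filter (fun s => PySem.Str.isIn s il))) PySem.Set.empty
  sectors.map (fun s =>
    (s, if PySem.Str.isIn s topic_lower then "high"
        else if PySem.Set.contains medium s then "medium" else "low"))

-- ===== PRECONDITION & SPEC =====
def Spec_assess_sector_impact_py (research_topic : String) (implications : List String) (out : List (String × String)) : Prop := out = assess_sector_impact_py_alt research_topic implications
instance (research_topic : String) (implications : List String) (out : List (String × String)) : Decidable (Spec_assess_sector_impact_py research_topic implications out) := by unfold Spec_assess_sector_impact_py; infer_instance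

-- ===== CLAIM (what is proved, stated in full; the proofs are below) =====
def Claim_equal_assess_sector_impact_py : Prop := ∀ (research_topic : String) (implications : List String), Dom_assess_sector_impact_py research_topic implications → Spec_assess_sector_impact_py research_topic implications (assess_sector_impact_py research_topic implications)

-- ===== LEMMAS AND PROOFS =====

-- membership in B's `medium` set equals A's per-sector `any` scan, for any sector
lemma mem_medium_foldl (sectors : List String) (impls : List String) (acc : PySem.Set String) (s : String) :
    s ∈ impls.foldl (fun acc impl =>
      PySem.Set.update acc (sectors.filter (fun t => PySem.Str.isIn t (PySem.Str.lower impl)))) acc ↔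
    s ∈ acc ∨ ∃ i ∈ impls, s ∈ sectors ∧ PySem.Str.isIn s (PySem.Str.lower i) = true := by
  induction impls generalizing acc with
  | nil => simp
  | cons i is ih =>
    simp only [List.foldl_cons, ih, PySem.Set.mem_update, List.mem_filter]
    constructor
    · rintro (((h | ⟨h1, h2⟩) | h) )
      · exact Or.inl h
      · exact Or.inr ⟨i, by simp, h1, h2⟩
      · rcases h with ⟨j, hj, h1, h2⟩; exact Or.inr ⟨j, by simp [hj], h1, h2⟩
    · rintro (h | ⟨j, hj, h1, h2⟩)
      · exact Or.inl (Or.inl h)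
      · rcases List.mem_cons.mp hj with rfl | hj
        · exact Or.inl (Or.inr ⟨h1, h2⟩)
        · exact Or.inr ⟨j, hj, h1, h2⟩

lemma contains_medium (impls : List String) (s : String)
    (hs : s ∈ (["technology", "healthcare", "finance", "energy", "consumer", "industrial"] : List String)) :
    PySem.Set.contains (impls.foldl (fun acc impl =>
      PySem.Set.update acc ((["technology", "healthcare", "finance", "energy", "consumer", "industrial"] : List String).filter
        (fun t => PySem.Str.isIn t (PySem.Str.lower impl)))) PySem.Set.empty) s =
    impls.any (fun impl => PySem.Str.isIn s (PySem.Str.lower impl)) := by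
  rcases h : impls.any (fun impl => PySem.Str.isIn s (PySem.Str.lower impl)) with _ | _
  · rw [Bool.eq_false_iff]
    intro hc
    rw [PySem.Set.contains_iff, mem_medium_foldl] at hc
    rcases hc with hc | ⟨i, hi, _, hin⟩
    · simp [PySem.Set.empty] at hc
    · rw [Bool.eq_false_iff] at h
      exact h (List.any_eq_true.mpr ⟨i, hi, hin⟩)
  · rcases List.any_eq_true.mp h with ⟨i, hi, hin⟩
    rw [PySem.Set.contains_iff, mem_medium_foldl]
    exact Or.inr ⟨i, hi, hs, hin⟩

-- ===== VERDICT (by name: the statement is the Claim_ definition above) =====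
theorem assess_sector_impact_py_spec : Claim_equal_assess_sector_impact_py := by
  intro research_topic implications _
  unfold Spec_assess_sector_impact_py assess_sector_impact_py assess_sector_impact_py_alt
  have hbody : (fun (d : PySem.Dict String String) (sector : String) =>
      if PySem.Str.isIn sector (PySem.Str.lower research_topic) then
        PySem.Dict.insert d sector "high"
      else if implications.any (fun impl => PySem.Str.isIn sector (PySem.Str.lower impl)) then
        PySem.Dict.insert d sector "medium"
      else
        PySem.Dict.insert d sector "low") =
      (fun (d : PySem.Dict String String) (sector : String) =>
        PySem.Dict.insert d (id sector)
          (if PySem.Str.isIn sector (PySem.Str.lower research_topic) then "high"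
           else if implications.any (fun impl => PySem.Str.isIn sector (PySem.Str.lower impl)) then "medium"
           else "low")) := by
    funext d sector; split_ifs <;> rfl
  simp only []
  rw [hbody, PySem.Dict.items_foldl_insert_fresh _ _ _ _ (by intro a _; exact PySem.Dict.contains_empty _) (by decide)]
  simp only [PySem.Dict.empty, List.nil_append, List.map_cons, List.map_nil, id]
  rw [contains_medium implications "technology" (by decide),
      contains_medium implications "healthcare" (by decide),
      contains_medium implications "finance" (by decide),
      contains_medium implications "energy" (by decide),
      contains_medium implications "consumer" (by decide),
      contains_medium implications "industrial" (by decide)]
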